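-- pv_equiv track=rewrite | github.com/NicolasBondouxA/openbackend_clustering_ls | openbackend_clustering/instance/instance.py | _find_best_cluster_mapping
-- ===== SOURCE A (Python) =====
-- def _find_best_cluster_mapping(self_clusters, other_clusters):
--     """
--     Finds a mapping of cluster ids between 2 solutions. Returns a dict which keys correspond to the cluster indices
--     of the other solution and the values to the cluster indices of the current solution. It can then be used to
--     reassign cluster indices in the other solution so that it matches the current clustering indices.
--
--     :param self_clusters: clusters from the current instance object, result of a call to retrieve_clusters.
--     :param other_clusters: clusters from the other instance object, result of a call to retrieve_clusters.
--     :return: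
--     """
--
--     if not self_clusters or not other_clusters:
--         return None
--     best_matches = {}
--     for self_cluster in self_clusters:
--         best_matches[self_cluster] = {}
--         for other_cluster in other_clusters:
--             current_count = len(self_clusters[self_cluster] - other_clusters[other_cluster]) \
--                             + len(other_clusters[other_cluster] - self_clusters[self_cluster])
--             best_matches[self_cluster][other_cluster] = current_count
--
--     def find_min_match():
--         best_val = float('inf')
--         best_match = None
--         for self_cluster in best_matches:
--             for other_cluster in best_matches[self_cluster]:
--                 if best_matches[self_cluster][other_cluster] < best_val:
--                     best_val = best_matches[self_cluster][other_cluster]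
--                     best_match = (self_cluster, other_cluster)
--         return best_match
--
--     mapping = {}
--     while best_matches:
--         self_cluster, other_cluster = find_min_match()
--         best_matches.pop(self_cluster)
--         for cluster in best_matches:
--             if other_cluster in best_matches[cluster]:
--                 best_matches[cluster].pop(other_cluster)
--         mapping[other_cluster] = self_cluster
--
--     # mapping = {best_matches[key]: key for key in best_matches}
--     next_idx = len(self_clusters.keys())
--     for cluster in other_clusters:
--         if cluster not in mapping:
--             mapping[cluster] = next_idx
--             next_idx += 1
--
--     return mapping
-- ===== SOURCE B (Python) =====
-- def _find_best_cluster_mapping(self_clusters, other_clusters):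
--     if not self_clusters or not other_clusters:
--         return None
--     s_items = list(self_clusters.items())
--     o_items = list(other_clusters.items())
--     triples = [(len(sv ^ ov), i, j)
--                for i, (_, sv) in enumerate(s_items)
--                for j, (_, ov) in enumerate(o_items)]
--     triples.sort(key=lambda t: t[0])
--     used_s, used_o, mapping = set(), set(), {}
--     for _, i, j in triples:
--         if i not in used_s and j not in used_o:
--             used_s.add(i)
--             used_o.add(j)
--             mapping[o_items[j][0]] = s_items[i][0]
--     next_idx = len(s_items)
--     for ok, _ in o_items:
--         if ok not in mapping:
--             mapping[ok] = next_idx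
--             next_idx += 1
--     return mapping
-- ===== Notes on version B (the rewrite author's own statement) =====
-- stated objective: faster
-- what changed: A repeatedly rescans the whole dict-of-dicts of pairwise symmetric-difference counts to extract each minimum (and pops rows/columns); B builds the (count, i, j) triples once, sorts them by count (stable, so ties keep A's first-wins (i, j) order) and does a single scan skipping already-matched rows/columns.
import Mathlib
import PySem

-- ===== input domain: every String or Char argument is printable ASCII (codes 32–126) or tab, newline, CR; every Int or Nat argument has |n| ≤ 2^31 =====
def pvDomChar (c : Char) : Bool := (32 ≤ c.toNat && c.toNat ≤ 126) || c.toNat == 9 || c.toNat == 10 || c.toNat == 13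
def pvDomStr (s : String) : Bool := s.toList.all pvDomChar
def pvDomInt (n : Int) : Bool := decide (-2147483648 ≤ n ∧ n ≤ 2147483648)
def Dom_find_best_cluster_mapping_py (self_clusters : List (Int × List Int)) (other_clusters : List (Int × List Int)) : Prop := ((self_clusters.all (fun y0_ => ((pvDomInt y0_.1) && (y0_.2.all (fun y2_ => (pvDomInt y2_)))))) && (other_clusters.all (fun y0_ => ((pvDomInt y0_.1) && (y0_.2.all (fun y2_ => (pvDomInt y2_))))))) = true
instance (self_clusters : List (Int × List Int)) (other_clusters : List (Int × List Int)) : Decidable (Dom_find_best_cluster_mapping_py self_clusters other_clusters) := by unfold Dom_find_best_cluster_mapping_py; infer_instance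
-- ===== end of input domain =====

-- B replaces A's quadratic repeated scan for the minimum ("find_min_match" over the whole
-- dict-of-dicts, once per self cluster) by sorting all (count, i, j) pair triples once and
-- scanning them while skipping already-matched rows/columns; equal return values on Pre_.

-- ===== PORT A =====
-- len(self_set - other_set) + len(other_set - self_set)
def pvCountA (sv ov : List Int) : Int :=
  PySem.Set.len (PySem.Set.diff (PySem.Set.ofList sv) (PySem.Set.ofList ov)) +
  PySem.Set.len (PySem.Set.diff (PySem.Set.ofList ov) (PySem.Set.ofList sv))

-- the nested loop building best_matches
def pvBuildBM (S O : List (Int × List Int)) : PySem.Dict Int (PySem.Dict Int Int) :=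
  S.foldl (fun bm sc => bm.insert sc.1
      (O.foldl (fun inner oc => inner.insert oc.1 (pvCountA sc.2 oc.2)) PySem.Dict.empty))
    PySem.Dict.empty

-- find_min_match: best_val starts at float('inf'), modelled as `none`
def pvFindMin (bm : PySem.Dict Int (PySem.Dict Int Int)) : Option (Int × Int) :=
  (bm.items.foldl
    (fun st row => row.2.items.foldl
      (fun st e =>
        match st.1 with
        | none => (some e.2, some (row.1, e.1))
        | some bv => if e.2 < bv then (some e.2, some (row.1, e.1)) else st) st)
    ((none : Option Int), (none : Option (Int × Int)))).2

-- the `while best_matches:` loop; fuel = number of keys (one key is popped per iteration);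
-- `none` stands for the TypeError Python raises when find_min_match returns None (outside Pre_)
def pvLoopA : Nat → PySem.Dict Int (PySem.Dict Int Int) → PySem.Dict Int Int → Option (PySem.Dict Int Int)
  | fuel, bm, mapping =>
    if bm.items.isEmpty then some mapping
    else
      match fuel, pvFindMin bm with
      | 0, _ => none
      | _ + 1, none => none
      | fuel' + 1, some (sk, ok) =>
        pvLoopA fuel'
          (PySem.Dict.mk (((bm.erase sk).items).map (fun row => (row.1, row.2.erase ok))))
          (mapping.insert ok sk)

def find_best_cluster_mapping_py (self_clusters : List (Int × List Int)) (other_clusters : List (Int × List Int)) : Option (List (Int × Int)) :=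
  if self_clusters.isEmpty || other_clusters.isEmpty then none
  else
    match pvLoopA (pvBuildBM self_clusters other_clusters).size (pvBuildBM self_clusters other_clusters) PySem.Dict.empty with
    | none => none  -- Python raises TypeError here; these inputs are outside Pre_
    | some mapping =>
      some ((other_clusters.foldl
        (fun st oc => if st.1.contains oc.1 then st else (st.1.insert oc.1 st.2, st.2 + 1))
        (mapping, PySem.List.len self_clusters)).1.items)

-- ===== PORT B =====
-- len(sv ^ ov)
def pvCountB (sv ov : List Int) : Int :=
  PySem.Set.len (PySem.Set.symmDiff (PySem.Set.ofList sv) (PySem.Set.ofList ov))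

def find_best_cluster_mapping_py_alt (self_clusters : List (Int × List Int)) (other_clusters : List (Int × List Int)) : Option (List (Int × Int)) :=
  if self_clusters.isEmpty || other_clusters.isEmpty then none
  else
    let triples := (PySem.List.enumerate self_clusters).flatMap (fun si =>
      (PySem.List.enumerate other_clusters).map (fun oj => (pvCountB si.2.2 oj.2.2, si.1, oj.1)))
    let pairs := PySem.List.sorted triples (fun t => t.1)
    let scan := pairs.foldl
      (fun st t =>
        if PySem.Set.contains st.1 t.2.1 || PySem.Set.contains st.2.1 t.2.2 then st
        else (PySem.Set.add st.1 t.2.1, PySem.Set.add st.2.1 t.2.2,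
              st.2.2 ++ [((PySem.List.pyGetD other_clusters t.2.2 (0, [])).1,
                          (PySem.List.pyGetD self_clusters t.2.1 (0, [])).1)]))
      ((PySem.Set.empty : PySem.Set Int), (PySem.Set.empty : PySem.Set Int), ([] : List (Int × Int)))
    let rest := other_clusters.foldl
      (fun st oc => if st.1.any (fun p => p.1 == oc.1) then st else (st.1 ++ [(oc.1, st.2)], st.2 + 1))
      (scan.2.2, PySem.List.len self_clusters)
    some rest.1

-- ===== PRECONDITION & SPEC =====
-- Pre_ excludes (a) association lists with duplicate keys, which do not encode any Python dict
-- (both arguments are dicts in Python, so their key lists are necessarily duplicate-free), and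
-- (b) the inputs on which A raises TypeError (both dicts non-empty and strictly more self
-- clusters than other clusters: find_min_match then returns None and unpacking it raises).
def Pre_find_best_cluster_mapping_py (self_clusters : List (Int × List Int)) (other_clusters : List (Int × List Int)) : Prop :=
  (self_clusters.map Prod.fst).Nodup ∧ (other_clusters.map Prod.fst).Nodup ∧
  (self_clusters = [] ∨ other_clusters = [] ∨ self_clusters.length ≤ other_clusters.length)
instance (self_clusters : List (Int × List Int)) (other_clusters : List (Int × List Int)) : Decidable (Pre_find_best_cluster_mapping_py self_clusters other_clusters) := by unfold Pre_find_best_cluster_mapping_py; infer_instance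

def pvWitness_find_best_cluster_mapping_py : (List (Int × List Int)) × (List (Int × List Int)) :=
  ([(0, [1, 2]), (1, [3])], [(5, [3]), (6, [1, 2])])

def Spec_find_best_cluster_mapping_py (self_clusters : List (Int × List Int)) (other_clusters : List (Int × List Int)) (out : Option (List (Int × Int))) : Prop := out = find_best_cluster_mapping_py_alt self_clusters other_clusters
instance (self_clusters : List (Int × List Int)) (other_clusters : List (Int × List Int)) (out : Option (List (Int × Int))) : Decidable (Spec_find_best_cluster_mapping_py self_clusters other_clusters out) := by unfold Spec_find_best_cluster_mapping_py; infer_instance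

-- ===== CLAIM (what is proved, stated in full; the proofs are below) =====
def Claim_equal_find_best_cluster_mapping_py : Prop := ∀ (self_clusters : List (Int × List Int)) (other_clusters : List (Int × List Int)), Dom_find_best_cluster_mapping_py self_clusters other_clusters → Pre_find_best_cluster_mapping_py self_clusters other_clusters → Spec_find_best_cluster_mapping_py self_clusters other_clusters (find_best_cluster_mapping_py self_clusters other_clusters)
-- ===== LEMMAS AND PROOFS =====

-- the entry type carried by the mediator: (index, key, value-set)
-- pvE abbreviates Int × Int × List Int

-- mediating "greedy matrix" machinery (proof-only)
def pvFlat (Srem Orem : List (Int × Int × List Int)) : List (Int × (Int × Int × List Int) × (Int × Int × List Int)) :=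
  Srem.flatMap (fun s => Orem.map (fun o => (pvCountA s.2.2 o.2.2, s, o)))

def pvMinF {β : Type} (val : β → Int) (l : List β) (b : Option β) : Option β :=
  l.foldl (fun bb t => match bb with | none => some t | some x => if val t < val x then some t else bb) b

def pvGreedy : Nat → List (Int × Int × List Int) → List (Int × Int × List Int) → List (Int × Int)
  | 0, _, _ => []
  | fuel + 1, Srem, Orem =>
    match pvMinF (fun t => t.1) (pvFlat Srem Orem) none with
    | none => []
    | some t => (t.2.2.2.1, t.2.1.2.1) :: pvGreedy fuel (Srem.erase t.2.1) (Orem.erase t.2.2)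

def pvBMOf (Srem Orem : List (Int × Int × List Int)) : PySem.Dict Int (PySem.Dict Int Int) :=
  PySem.Dict.mk (Srem.map (fun s => (s.2.1, PySem.Dict.mk (Orem.map (fun o => (o.2.1, pvCountA s.2.2 o.2.2))))))

def pvProj (t : Int × (Int × Int × List Int) × (Int × Int × List Int)) : Int × Int × Int :=
  (t.1, t.2.1.1, t.2.2.1)

def pvLt (a b : Int × Int × Int) : Prop :=
  a.1 < b.1 ∨ (a.1 = b.1 ∧ (a.2.1 < b.2.1 ∨ (a.2.1 = b.2.1 ∧ a.2.2 < b.2.2)))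


-- count agreement: len(a-b)+len(b-a) = len(a^b)
theorem pvCount_eq (sv ov : List Int) : pvCountB sv ov = pvCountA sv ov := by
  simp [pvCountA, pvCountB, PySem.Set.symmDiff, PySem.Set.len]

-- ---- enumerate facts ----
theorem pvEnum_cons {α : Type} (x : α) (xs : List α) (s : Int) :
    PySem.List.enumerate (x :: xs) s = (s, x) :: PySem.List.enumerate xs (s + 1) := rfl

theorem pvEnum_mem {α : Type} {xs : List α} {s : Int} {p : Int × α}
    (h : p ∈ PySem.List.enumerate xs s) : ∃ k : Nat, xs[k]? = some p.2 ∧ p.1 = s + k := by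
  induction xs generalizing s with
  | nil => simp at h
  | cons x xs ih =>
    rw [pvEnum_cons, List.mem_cons] at h
    rcases h with h | h
    · exact ⟨0, by simp [h], by simp [h]⟩
    · obtain ⟨k, hk, hs⟩ := ih h
      refine ⟨k + 1, by simpa using hk, by push_cast; omega⟩

theorem pvEnum_pairwise {α : Type} (xs : List α) (s : Int) :
    (PySem.List.enumerate xs s).Pairwise (fun a b => a.1 < b.1) := by
  induction xs generalizing s with
  | nil => simp
  | cons x xs ih =>
    rw [pvEnum_cons]
    refine List.Pairwise.cons (fun b hb => ?_) (ih (s + 1))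
    obtain ⟨k, _, hk⟩ := pvEnum_mem hb
    omega

theorem pvEnum_map_snd {α β : Type} (g : α → β) (xs : List α) (s : Int) :
    (PySem.List.enumerate xs s).map (fun p => g p.2) = xs.map g := by
  induction xs generalizing s with
  | nil => rfl
  | cons x xs ih => rw [pvEnum_cons]; simp only [List.map_cons, ih]

theorem pvEnum_length {α : Type} (xs : List α) (s : Int) :
    (PySem.List.enumerate xs s).length = xs.length := by
  have := congrArg List.length (pvEnum_map_snd (fun a => a) xs s)
  simpa using this

theorem pvEnum_lookup {α : Type} {xs : List α} {p : Int × α} (d : α)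
    (h : p ∈ PySem.List.enumerate xs 0) : PySem.List.pyGetD xs p.1 d = p.2 := by
  obtain ⟨k, hk, hs⟩ := pvEnum_mem h
  have : p.1 = (k : Int) := by omega
  rw [this, PySem.List.pyGetD_natCast]
  simp [List.getD, hk]

-- two members of a (·.1 < ·.1)-pairwise list with the same first component are equal
theorem pvPairwise_fst_inj {α : Type} {l : List (Int × α)} (h : l.Pairwise (fun a b => a.1 < b.1))
    {a b : Int × α} (ha : a ∈ l) (hb : b ∈ l) (hfst : a.1 = b.1) : a = b := by
  induction l with
  | nil => simp at ha
  | cons x l ih =>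
    have hx : ∀ a' ∈ l, x.1 < a'.1 := fun a' h' => List.rel_of_pairwise_cons h h'
    have hl := List.Pairwise.of_cons h
    rcases List.mem_cons.mp ha with ha' | ha
    · rcases List.mem_cons.mp hb with hb' | hb
      · rw [ha', hb']
      · exact absurd hfst (by rw [ha']; have := hx _ hb; omega)
    · rcases List.mem_cons.mp hb with hb' | hb
      · exact absurd hfst (by rw [hb']; have := hx _ ha; omega)
      · exact ih hl ha hb

-- ---- pvMinF facts ----
theorem pvMinF_cons {β : Type} (val : β → Int) (x : β) (l : List β) (b : Option β) :
    pvMinF val (x :: l) b =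
      pvMinF val l (match b with | none => some x | some y => if val x < val y then some x else some y) := by
  cases b <;> rfl

theorem pvMinF_helper {β : Type} (val : β → Int) :
    ∀ (l : List β) (x : β),
      (pvMinF val l (some x) = some x ∧ ∀ u ∈ l, val x ≤ val u) ∨
      (∃ t l1 l2, pvMinF val l (some x) = some t ∧ l = l1 ++ t :: l2 ∧ val t < val x ∧
        (∀ u ∈ l1, val t < val u) ∧ (∀ u ∈ l2, val t ≤ val u)) := by
  intro l
  induction l with
  | nil => intro x; left; exact ⟨rfl, by simp⟩
  | cons u l ih =>
    intro x
    rw [pvMinF_cons]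
    by_cases h : val u < val x
    · simp only [h, if_pos]
      rcases ih u with ⟨he, hall⟩ | ⟨t, l1, l2, he, hsplit, hlt, h1, h2⟩
      · right; exact ⟨u, [], l, he, rfl, h, by simp, hall⟩
      · right
        refine ⟨t, u :: l1, l2, he, by simp [hsplit], lt_trans hlt h, ?_, h2⟩
        intro v hv
        rcases List.mem_cons.mp hv with rfl | hv
        · exact hlt
        · exact h1 v hv
    · simp only [h, ite_false]
      rcases ih x with ⟨he, hall⟩ | ⟨t, l1, l2, he, hsplit, hlt, h1, h2⟩
      · left
        refine ⟨he, fun v hv => ?_⟩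
        rcases List.mem_cons.mp hv with rfl | hv
        · omega
        · exact hall v hv
      · right
        refine ⟨t, u :: l1, l2, he, by simp [hsplit], hlt, ?_, h2⟩
        intro v hv
        rcases List.mem_cons.mp hv with rfl | hv
        · omega
        · exact h1 v hv

theorem pvMinF_spec {β : Type} (val : β → Int) {l : List β} (h : l ≠ []) :
    ∃ l1 t l2, pvMinF val l none = some t ∧ l = l1 ++ t :: l2 ∧
      (∀ u ∈ l1, val t < val u) ∧ (∀ u ∈ l2, val t ≤ val u) := by
  match l with
  | x :: l' =>
    rw [pvMinF_cons]
    rcases pvMinF_helper val l' x with ⟨he, hall⟩ | ⟨t, l1, l2, he, hsplit, hlt, h1, h2⟩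
    · exact ⟨[], x, l', he, rfl, by simp, hall⟩
    · refine ⟨x :: l1, t, l2, he, by simp [hsplit], ?_, h2⟩
      intro v hv
      rcases List.mem_cons.mp hv with rfl | hv
      · exact hlt
      · exact h1 v hv

-- the generic "first minimum wins" pair-state fold
theorem pvFoldA_eq_minF {γ : Type} (val : γ → Int) (pr : γ → Int × Int) :
    ∀ (l : List γ) (r : Option γ),
      l.foldl (fun st e =>
          match st.1 with
          | none => (some (val e), some (pr e))
          | some bv => if val e < bv then (some (val e), some (pr e)) else st)
        (r.map val, r.map pr)
      = ((pvMinF val l r).map val, (pvMinF val l r).map pr) := by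
  intro l
  induction l with
  | nil => intro r; rfl
  | cons e l ih =>
    intro r
    cases r with
    | none => simpa using ih (some e)
    | some x =>
      simp only [List.foldl_cons, Option.map_some]
      rw [pvMinF_cons]
      by_cases h : val e < val x
      · simpa [h] using ih (some e)
      · simpa [h] using ih (some x)

-- ---- pvFlat facts ----
theorem pvFlat_mem {Srem Orem : List (Int × Int × List Int)} {t} :
    t ∈ pvFlat Srem Orem ↔ ∃ s ∈ Srem, ∃ o ∈ Orem, t = (pvCountA s.2.2 o.2.2, s, o) := by
  simp [pvFlat]
  tauto

theorem pvFlat_nil_right (Srem : List (Int × Int × List Int)) : pvFlat Srem [] = [] := by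
  simp [pvFlat]

theorem pvFlat_pairwise {Srem Orem : List (Int × Int × List Int)}
    (hS : Srem.Pairwise (fun a b => a.1 < b.1)) (hO : Orem.Pairwise (fun a b => a.1 < b.1)) :
    (pvFlat Srem Orem).Pairwise
      (fun a b => a.2.1.1 < b.2.1.1 ∨ (a.2.1.1 = b.2.1.1 ∧ a.2.2.1 < b.2.2.1)) := by
  induction Srem with
  | nil => simp [pvFlat]
  | cons s Srem ih =>
    rcases hS with _ | ⟨hs, hS'⟩
    have : pvFlat (s :: Srem) Orem = Orem.map (fun o => (pvCountA s.2.2 o.2.2, s, o)) ++ pvFlat Srem Orem := by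
      simp [pvFlat]
    rw [this, List.pairwise_append]
    refine ⟨?_, ih hS', ?_⟩
    · rw [List.pairwise_map]
      exact hO.imp (by intro a b h; right; exact ⟨rfl, h⟩)
    · intro a ha b hb
      obtain ⟨o, _, rfl⟩ := List.mem_map.mp ha
      obtain ⟨s', hs', o', _, rfl⟩ := pvFlat_mem.mp hb
      exact Or.inl (hs s' hs')

-- ---- filter-by-key = erase ----
theorem pvFilter_key_eq_erase {α : Type} [BEq α] [LawfulBEq α] (key : α → Int) :
    ∀ (l : List α), (l.map key).Nodup → ∀ x ∈ l,
      l.filter (fun y => !(key y == key x)) = l.erase x := by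
  intro l
  induction l with
  | nil => intro _ x hx; simp at hx
  | cons a l ih =>
    intro hnd x hx
    simp only [List.map_cons, List.nodup_cons] at hnd
    rcases List.mem_cons.mp hx with rfl | hx
    · rw [List.filter_cons_of_neg (by simp)]
      rw [List.erase_cons_head]
      apply List.filter_eq_self.mpr
      intro y hy
      simp only [Bool.not_eq_eq_eq_not, Bool.not_true, beq_eq_false_iff_ne, ne_eq]
      intro hk
      exact hnd.1 (hk ▸ List.mem_map_of_mem hy)
    · have hne : key a ≠ key x := fun hk => hnd.1 (hk ▸ List.mem_map_of_mem hx)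
      have hax : a ≠ x := fun h => hne (congrArg key h)
      rw [List.filter_cons_of_pos (by simpa using hne)]
      rw [List.erase_cons_tail (by simpa using hax)]
      rw [ih hnd.2 x hx]

-- find_min on a structured matrix is the first-wins minimum of the flattened triples
theorem pvFindMin_bmOf (Srem Orem : List (Int × Int × List Int)) :
    pvFindMin (pvBMOf Srem Orem) =
      (pvMinF (fun t => t.1) (pvFlat Srem Orem) none).map (fun t => (t.2.1.2.1, t.2.2.2.1)) := by
  have h := pvFoldA_eq_minF (fun t : Int × (Int × Int × List Int) × (Int × Int × List Int) => t.1)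
      (fun t => (t.2.1.2.1, t.2.2.2.1)) (pvFlat Srem Orem) none
  simp only [Option.map_none] at h
  rw [show (pvMinF (fun t => t.1) (pvFlat Srem Orem) none).map (fun t => (t.2.1.2.1, t.2.2.2.1))
      = (((pvMinF (fun t => t.1) (pvFlat Srem Orem) none).map (fun t => t.1),
          (pvMinF (fun t => t.1) (pvFlat Srem Orem) none).map (fun t => (t.2.1.2.1, t.2.2.2.1)))).2 from rfl,
    ← h]
  simp only [pvFindMin, pvBMOf, pvFlat, List.foldl_flatMap, List.foldl_map]

-- entries with equal keys in a key-nodup list coincide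
theorem pvKey_inj {α : Type} {key : α → Int} {l : List α} (h : (l.map key).Nodup)
    {a b : α} (ha : a ∈ l) (hb : b ∈ l) (hk : key a = key b) : a = b :=
  List.inj_on_of_nodup_map h ha hb hk

-- the A loop computes greedy emission
theorem pvLoopA_eq (fuel : Nat) :
    ∀ (Srem Orem : List (Int × Int × List Int)) (mapping : PySem.Dict Int Int),
      fuel = Srem.length →
      ((Srem.map (fun s => s.2.1)).Nodup) →
      ((Orem.map (fun o => o.2.1)).Nodup) →
      Srem.length ≤ Orem.length →
      (∀ o ∈ Orem, mapping.contains o.2.1 = false) →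
      pvLoopA fuel (pvBMOf Srem Orem) mapping =
        some (PySem.Dict.mk (mapping.items ++ pvGreedy fuel Srem Orem)) := by
  induction fuel with
  | zero =>
    intro Srem Orem mapping hf _ _ _ _
    have hS : Srem = [] := List.length_eq_zero_iff.mp hf.symm
    subst hS
    rw [pvLoopA]
    simp [pvBMOf, pvGreedy]
  | succ fuel ih =>
    intro Srem Orem mapping hf hndS hndO hlen hfresh
    have hSne : Srem ≠ [] := by
      intro h; rw [h] at hf; simp at hf
    have hOne : Orem ≠ [] := by
      intro h
      rw [h] at hlen
      simp only [List.length_nil, Nat.le_zero] at hlen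
      omega
    obtain ⟨s0, Srem', hs0⟩ := List.exists_cons_of_ne_nil hSne
    obtain ⟨o0, Orem', ho0⟩ := List.exists_cons_of_ne_nil hOne
    have hflatmem : (pvCountA s0.2.2 o0.2.2, s0, o0) ∈ pvFlat Srem Orem :=
      pvFlat_mem.mpr ⟨s0, by rw [hs0]; exact List.mem_cons_self, o0, by rw [ho0]; exact List.mem_cons_self, rfl⟩
    have hflatne : pvFlat Srem Orem ≠ [] := List.ne_nil_of_mem hflatmem
    obtain ⟨l1, t, l2, he, hsplit, h1, h2⟩ := pvMinF_spec (fun t => t.1) hflatne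
    have htmem : t ∈ pvFlat Srem Orem := by rw [hsplit]; exact List.mem_append_right _ List.mem_cons_self
    obtain ⟨s, hs, o, ho, hteq⟩ := pvFlat_mem.mp htmem
    have hts : t.2.1 = s := by rw [hteq]
    have hto : t.2.2 = o := by rw [hteq]
    rw [pvLoopA.eq_def]
    dsimp only
    have hitems : (pvBMOf Srem Orem).items = Srem.map
        (fun s => (s.2.1, PySem.Dict.mk ((Orem.map (fun o => (o.2.1, pvCountA s.2.2 o.2.2)))))) := rfl
    have hne : (pvBMOf Srem Orem).items.isEmpty = false := by
      rw [hitems, hs0]; rfl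
    rw [hne, pvFindMin_bmOf, he]
    simp only [Bool.false_eq_true, if_false, Option.map_some]

    -- dict after the two pops is the structured matrix of the erased lists
    have hbm' : PySem.Dict.mk ((((pvBMOf Srem Orem).erase t.2.1.2.1).items).map
          (fun row => (row.1, row.2.erase t.2.2.2.1)))
        = pvBMOf (Srem.erase t.2.1) (Orem.erase t.2.2) := by
      apply PySem.Dict.ext
      show ((((pvBMOf Srem Orem).erase t.2.1.2.1).items).map
          (fun row => (row.1, row.2.erase t.2.2.2.1))) = _
      have her : ((pvBMOf Srem Orem).erase t.2.1.2.1).items =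
          (Srem.filter (fun y => !(y.2.1 == t.2.1.2.1))).map
            (fun s => (s.2.1, PySem.Dict.mk ((Orem.map (fun o => (o.2.1, pvCountA s.2.2 o.2.2)))))) := by
        show List.filter _ ((pvBMOf Srem Orem).items) = _
        rw [hitems, List.filter_map]
        rfl
      rw [her, hts, pvFilter_key_eq_erase (fun e => e.2.1) Srem hndS s hs]
      show _ = (Srem.erase s).map _
      rw [List.map_map]
      apply List.map_congr_left
      intro s' _
      simp only [Function.comp]
      refine congrArg (fun d => (s'.2.1, d)) ?_
      apply PySem.Dict.ext
      show List.filter _ _ = _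
      rw [List.filter_map]
      show List.map _ (List.filter (fun y => !(y.2.1 == t.2.2.2.1)) Orem) = _
      rw [hto, pvFilter_key_eq_erase (fun e => e.2.1) Orem hndO o ho]
    rw [hbm']
    -- the inserted other-key is fresh in mapping
    have hofresh : mapping.contains t.2.2.2.1 = false := by
      rw [hto]; exact hfresh o ho
    have hins : (mapping.insert t.2.2.2.1 t.2.1.2.1).items
        = mapping.items ++ [(t.2.2.2.1, t.2.1.2.1)] :=
      PySem.Dict.items_insert_of_not_contains _ _ hofresh
    have hOndup : Orem.Nodup := List.Nodup.of_map _ hndO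
    have ihres := ih (Srem.erase t.2.1) (Orem.erase t.2.2) (mapping.insert t.2.2.2.1 t.2.1.2.1)
      (by rw [hts, List.length_erase_of_mem hs]; omega)
      (by rw [hts]; exact hndS.sublist (List.Sublist.map _ (List.erase_sublist)))
      (by rw [hto]; exact hndO.sublist (List.Sublist.map _ (List.erase_sublist)))
      (by rw [hts, hto, List.length_erase_of_mem hs, List.length_erase_of_mem ho]; omega)
      (by
        intro o' ho'
        rw [hto] at ho'
        have ho'2 : o' ∈ Orem := List.mem_of_mem_erase ho'
        have hne' : o' ≠ o := ((List.Nodup.mem_erase_iff hOndup).mp ho').1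
        have hkne : (o'.2.1 == t.2.2.2.1) = false := by
          rw [hto]
          apply beq_eq_false_iff_ne.mpr
          intro hk
          exact hne' (pvKey_inj hndO ho'2 ho hk)
        rw [PySem.Dict.contains_insert, hkne, Bool.false_or]
        exact hfresh o' ho'2)
    rw [ihres, hins]
    rw [show pvGreedy (fuel + 1) Srem Orem
        = (t.2.2.2.1, t.2.1.2.1) :: pvGreedy fuel (Srem.erase t.2.1) (Orem.erase t.2.2) from by
      rw [pvGreedy, he]]
    rw [List.append_assoc]
    rfl

-- valid-triple machinery for the B side
def pvAllT (S O : List (Int × List Int)) : List (Int × Int × Int) :=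
  (PySem.List.enumerate S).flatMap (fun si =>
    (PySem.List.enumerate O).map (fun oj => (pvCountB si.2.2 oj.2.2, si.1, oj.1)))

def pvSrem (S : List (Int × List Int)) (usedS : PySem.Set Int) : List (Int × Int × List Int) :=
  (PySem.List.enumerate S).filter (fun s => !(PySem.Set.contains usedS s.1))

theorem pvAllT_eq (S O : List (Int × List Int)) :
    pvAllT S O = (pvFlat (PySem.List.enumerate S) (PySem.List.enumerate O)).map pvProj := by
  simp only [pvAllT, pvFlat, List.map_flatMap, List.map_map]
  apply List.flatMap_congr
  intro si _
  apply List.map_congr_left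
  intro oj _
  simp [pvProj, Function.comp, pvCount_eq]


theorem pvLt_asymm {a b : Int × Int × Int} (h1 : pvLt a b) (h2 : pvLt b a) : False := by
  rcases h1 with h1 | ⟨e1, h1 | ⟨f1, g1⟩⟩ <;> rcases h2 with h2 | ⟨e2, h2 | ⟨f2, g2⟩⟩ <;> omega

theorem pvAllT_mem {S O : List (Int × List Int)} {t : Int × Int × Int} :
    t ∈ pvAllT S O ↔ ∃ s ∈ PySem.List.enumerate S, ∃ o ∈ PySem.List.enumerate O,
      t = (pvCountB s.2.2 o.2.2, s.1, o.1) := by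
  simp [pvAllT]
  tauto

theorem pvSrem_mem {S : List (Int × List Int)} {u : PySem.Set Int} {s : Int × Int × List Int} :
    s ∈ pvSrem S u ↔ s ∈ PySem.List.enumerate S ∧ PySem.Set.contains u s.1 = false := by
  simp [pvSrem, List.mem_filter]

theorem pvSrem_pairwise (S : List (Int × List Int)) (u : PySem.Set Int) :
    (pvSrem S u).Pairwise (fun a b => a.1 < b.1) := by
  rw [pvSrem]
  exact List.Pairwise.sublist List.filter_sublist (pvEnum_pairwise S 0)

theorem pvSrem_fst_nodup (S : List (Int × List Int)) (u : PySem.Set Int) :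
    ((pvSrem S u).map (fun e => e.1)).Nodup := by
  have h := pvSrem_pairwise S u
  exact List.pairwise_map.mpr (h.imp (fun hab => ne_of_lt hab))

theorem pvContains_add (u : PySem.Set Int) (i x : Int) :
    PySem.Set.contains (PySem.Set.add u i) x = (PySem.Set.contains u x || x == i) := by
  by_cases hm : x ∈ PySem.Set.add u i
  · rw [(PySem.Set.contains_iff _ _).mpr hm]
    rcases (PySem.Set.mem_add u i x).mp hm with hh | hh
    · rw [(PySem.Set.contains_iff u x).mpr hh]; rfl
    · rw [beq_iff_eq.mpr hh, Bool.or_true]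
  · have hc : PySem.Set.contains (PySem.Set.add u i) x = false :=
      Bool.eq_false_iff.mpr (fun hh => hm ((PySem.Set.contains_iff _ _).mp hh))
    have h1 : x ∉ u := fun hh => hm ((PySem.Set.mem_add u i x).mpr (Or.inl hh))
    have h2 : x ≠ i := fun hh => hm ((PySem.Set.mem_add u i x).mpr (Or.inr hh))
    rw [hc, Bool.eq_false_iff.mpr (fun hh => h1 ((PySem.Set.contains_iff u x).mp hh)),
      beq_eq_false_iff_ne.mpr h2]
    rfl

theorem pvValid_flat {S O : List (Int × List Int)} {usedS usedO : PySem.Set Int}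
    {t : Int × Int × Int} (ht : t ∈ pvAllT S O)
    (hvs : PySem.Set.contains usedS t.2.1 = false) (hvo : PySem.Set.contains usedO t.2.2 = false) :
    ∃ s o, s ∈ pvSrem S usedS ∧ o ∈ pvSrem O usedO ∧ s.1 = t.2.1 ∧ o.1 = t.2.2 ∧
      (pvCountA s.2.2 o.2.2, s, o) ∈ pvFlat (pvSrem S usedS) (pvSrem O usedO) ∧
      pvProj (pvCountA s.2.2 o.2.2, s, o) = t := by
  obtain ⟨s, hs, o, ho, rfl⟩ := pvAllT_mem.mp ht
  have hs' : s ∈ pvSrem S usedS := pvSrem_mem.mpr ⟨hs, hvs⟩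
  have ho' : o ∈ pvSrem O usedO := pvSrem_mem.mpr ⟨ho, hvo⟩
  exact ⟨s, o, hs', ho', rfl, rfl,
    pvFlat_mem.mpr ⟨s, hs', o, ho', rfl⟩, by simp [pvProj, pvCount_eq]⟩

theorem pvFlat_valid {S O : List (Int × List Int)} {usedS usedO : PySem.Set Int}
    {u : Int × (Int × Int × List Int) × (Int × Int × List Int)}
    (hu : u ∈ pvFlat (pvSrem S usedS) (pvSrem O usedO)) :
    pvProj u ∈ pvAllT S O ∧ PySem.Set.contains usedS (pvProj u).2.1 = false ∧
      PySem.Set.contains usedO (pvProj u).2.2 = false := by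
  obtain ⟨s, hs, o, ho, rfl⟩ := pvFlat_mem.mp hu
  obtain ⟨hs1, hs2⟩ := pvSrem_mem.mp hs
  obtain ⟨ho1, ho2⟩ := pvSrem_mem.mp ho
  exact ⟨pvAllT_mem.mpr ⟨s, hs1, o, ho1, by simp [pvProj, pvCount_eq]⟩, hs2, ho2⟩

theorem pvFlat_min_least {Srem Orem : List (Int × Int × List Int)}
    (hS : Srem.Pairwise (fun a b => a.1 < b.1)) (hO : Orem.Pairwise (fun a b => a.1 < b.1))
    {m} (he : pvMinF (fun t => t.1) (pvFlat Srem Orem) none = some m) :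
    m ∈ pvFlat Srem Orem ∧
      ∀ u ∈ pvFlat Srem Orem, pvProj u ≠ pvProj m → pvLt (pvProj m) (pvProj u) := by
  have hne : pvFlat Srem Orem ≠ [] := by
    intro h
    rw [h] at he
    simp [pvMinF] at he
  obtain ⟨l1, t, l2, he2, hsplit, h1, h2⟩ := pvMinF_spec (fun t => t.1) hne
  rw [he2] at he
  obtain rfl := Option.some.inj he
  have hpw := pvFlat_pairwise hS hO
  rw [hsplit, List.pairwise_append] at hpw
  obtain ⟨_, hpw2, hcross⟩ := hpw
  have hmmem : t ∈ pvFlat Srem Orem := by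
    rw [hsplit]; exact List.mem_append_right _ List.mem_cons_self
  refine ⟨hmmem, fun u hu hneq => ?_⟩
  rw [hsplit] at hu
  rcases List.mem_append.mp hu with hu | hu
  · exact Or.inl (h1 u hu)
  · rcases List.mem_cons.mp hu with rfl | hu
    · exact absurd rfl hneq
    · have hv := h2 u hu
      have hpos := List.rel_of_pairwise_cons hpw2 hu
      rcases lt_or_eq_of_le hv with hlt | heq
      · exact Or.inl hlt
      · refine Or.inr ⟨heq, ?_⟩
        rcases hpos with hc | ⟨hc1, hc2⟩
        · exact Or.inl hc
        · exact Or.inr ⟨hc1, hc2⟩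

theorem pvSrem_add {S : List (Int × List Int)} {u : PySem.Set Int} {s : Int × Int × List Int}
    (hs : s ∈ pvSrem S u) :
    pvSrem S (PySem.Set.add u s.1) = (pvSrem S u).erase s := by
  have h1 : pvSrem S (PySem.Set.add u s.1)
      = (pvSrem S u).filter (fun y => !(y.1 == s.1)) := by
    rw [pvSrem, pvSrem, List.filter_filter]
    apply List.filter_congr
    intro x _
    rw [pvContains_add]
    cases PySem.Set.contains u x.1 <;> cases hxe : (x.1 == s.1) <;> rfl
  rw [h1]
  exact pvFilter_key_eq_erase (fun e => e.1) (pvSrem S u) (pvSrem_fst_nodup S u) s hs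

-- the B scan computes greedy emission
theorem pvScan_eq (S O : List (Int × List Int)) :
    ∀ (rest : List (Int × Int × Int)) (usedS usedO : PySem.Set Int) (acc : List (Int × Int)),
      rest.Pairwise pvLt →
      (∀ t ∈ rest, t ∈ pvAllT S O) →
      (∀ t ∈ pvAllT S O, PySem.Set.contains usedS t.2.1 = false →
        PySem.Set.contains usedO t.2.2 = false → t ∈ rest) →
      (rest.foldl
        (fun st t =>
          if PySem.Set.contains st.1 t.2.1 || PySem.Set.contains st.2.1 t.2.2 then st
          else (PySem.Set.add st.1 t.2.1, PySem.Set.add st.2.1 t.2.2,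
                st.2.2 ++ [((PySem.List.pyGetD O t.2.2 (0, [])).1,
                            (PySem.List.pyGetD S t.2.1 (0, [])).1)]))
        (usedS, usedO, acc)).2.2
      = acc ++ pvGreedy (pvSrem S usedS).length (pvSrem S usedS) (pvSrem O usedO) := by
  intro rest
  induction rest with
  | nil =>
    intro usedS usedO acc _ _ hvalid
    simp only [List.foldl_nil]
    have hg : pvGreedy (pvSrem S usedS).length (pvSrem S usedS) (pvSrem O usedO) = [] := by
      cases hs : pvSrem S usedS with
      | nil => rfl
      | cons s Srem2 =>
        cases ho : pvSrem O usedO with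
        | nil =>
          rw [List.length_cons, pvGreedy, pvFlat_nil_right]
          rfl
        | cons o Orem2 =>
          exfalso
          have hfl : (pvCountA s.2.2 o.2.2, s, o) ∈ pvFlat (pvSrem S usedS) (pvSrem O usedO) :=
            pvFlat_mem.mpr ⟨s, by rw [hs]; exact List.mem_cons_self,
              o, by rw [ho]; exact List.mem_cons_self, rfl⟩
          obtain ⟨h1, h2, h3⟩ := pvFlat_valid (S := S) (O := O) hfl
          exact List.not_mem_nil (hvalid _ h1 h2 h3)
    rw [hg, List.append_nil]
  | cons t tail ih =>
    intro usedS usedO acc hp hmem hvalid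
    simp only [List.foldl_cons]
    by_cases hused : (PySem.Set.contains usedS t.2.1 || PySem.Set.contains usedO t.2.2) = true
    · rw [if_pos hused]
      refine ih usedS usedO acc (List.Pairwise.of_cons hp)
        (fun u hu => hmem u (List.mem_cons_of_mem _ hu)) ?_
      intro u hu hv1 hv2
      rcases List.mem_cons.mp (hvalid u hu hv1 hv2) with rfl | h
      · exfalso; rw [hv1, hv2] at hused; exact Bool.noConfusion hused
      · exact h
    · rw [if_neg hused]
      have hb := Bool.or_eq_false_iff.mp (Bool.eq_false_iff.mpr hused)
      have hvs : PySem.Set.contains usedS t.2.1 = false := hb.1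
      have hvo : PySem.Set.contains usedO t.2.2 = false := hb.2
      have ht : t ∈ pvAllT S O := hmem t List.mem_cons_self
      obtain ⟨s, o, hsrem, horem, hs1, ho1, hflmem, hproj⟩ := pvValid_flat ht hvs hvo
      have hflne : pvFlat (pvSrem S usedS) (pvSrem O usedO) ≠ [] := List.ne_nil_of_mem hflmem
      obtain ⟨l1, m, l2, he, hsplit, h1, h2⟩ := pvMinF_spec (fun t => t.1) hflne
      obtain ⟨hmmem, hleast⟩ := pvFlat_min_least (pvSrem_pairwise S usedS) (pvSrem_pairwise O usedO) he
      -- the minimum is exactly the head t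
      have hm : pvProj m = t := by
        by_contra hne2
        have hL1 : pvLt (pvProj m) t := by
          have := hleast _ hflmem (by rw [hproj]; exact fun hh => hne2 hh.symm)
          rw [hproj] at this
          exact this
        have hL2 : pvLt t (pvProj m) := by
          obtain ⟨ha1, ha2, ha3⟩ := pvFlat_valid (S := S) (O := O) hmmem
          have hmem2 := hvalid _ ha1 ha2 ha3
          rcases List.mem_cons.mp hmem2 with heq | hmem3
          · exact absurd heq hne2
          · exact List.rel_of_pairwise_cons hp hmem3
        exact pvLt_asymm hL1 hL2
      -- identify the entries of the minimum
      obtain ⟨sm, hsm, om, hom, hmeq⟩ := pvFlat_mem.mp hmmem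
      have hsm1 : sm.1 = t.2.1 := by
        have := congrArg (fun x => x.2.1) hm
        simpa [hmeq, pvProj] using this
      have hom1 : om.1 = t.2.2 := by
        have := congrArg (fun x => x.2.2) hm
        simpa [hmeq, pvProj] using this
      have hsm_eq : sm = s := pvPairwise_fst_inj (pvSrem_pairwise S usedS) hsm hsrem (by rw [hsm1, hs1])
      have hom_eq : om = o := pvPairwise_fst_inj (pvSrem_pairwise O usedO) hom horem (by rw [hom1, ho1])
      -- unfold the greedy step
      obtain ⟨k, hk⟩ : ∃ k, (pvSrem S usedS).length = k + 1 := by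
        refine ⟨(pvSrem S usedS).length - 1, ?_⟩
        have := List.length_pos_of_mem hsrem
        omega
      have hgreedy : pvGreedy (pvSrem S usedS).length (pvSrem S usedS) (pvSrem O usedO)
          = (m.2.2.2.1, m.2.1.2.1) ::
            pvGreedy k ((pvSrem S usedS).erase m.2.1) ((pvSrem O usedO).erase m.2.2) := by
        rw [hk, pvGreedy, he]
      -- emitted pair agrees with the indexed lookups
      have hsenum : s ∈ PySem.List.enumerate S := (pvSrem_mem.mp hsrem).1
      have hoenum : o ∈ PySem.List.enumerate O := (pvSrem_mem.mp horem).1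
      have hlookS : (PySem.List.pyGetD S t.2.1 (0, [])).1 = m.2.1.2.1 := by
        rw [← hs1, pvEnum_lookup (0, []) hsenum, hmeq, hsm_eq]
      have hlookO : (PySem.List.pyGetD O t.2.2 (0, [])).1 = m.2.2.2.1 := by
        rw [← ho1, pvEnum_lookup (0, []) hoenum, hmeq, hom_eq]
      -- recurse
      have hSrem' : pvSrem S (PySem.Set.add usedS t.2.1) = (pvSrem S usedS).erase m.2.1 := by
        rw [← hs1, pvSrem_add hsrem, hmeq, hsm_eq]
      have hOrem' : pvSrem O (PySem.Set.add usedO t.2.2) = (pvSrem O usedO).erase m.2.2 := by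
        rw [← ho1, pvSrem_add horem, hmeq, hom_eq]
      have hklen : (pvSrem S (PySem.Set.add usedS t.2.1)).length = k := by
        rw [hSrem', hmeq, hsm_eq, List.length_erase_of_mem hsrem]
        omega
      have hrec := ih (PySem.Set.add usedS t.2.1) (PySem.Set.add usedO t.2.2)
        (acc ++ [((PySem.List.pyGetD O t.2.2 (0, [])).1, (PySem.List.pyGetD S t.2.1 (0, [])).1)])
        (List.Pairwise.of_cons hp)
        (fun u hu => hmem u (List.mem_cons_of_mem _ hu))
        ?_
      · rw [hrec, hklen, hSrem', hOrem', hgreedy, hlookS, hlookO, List.append_assoc]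
        rfl
      · intro u hu hv1 hv2
        rw [pvContains_add] at hv1 hv2
        have hv1' := Bool.or_eq_false_iff.mp hv1
        have hv2' := Bool.or_eq_false_iff.mp hv2
        rcases List.mem_cons.mp (hvalid u hu hv1'.1 hv2'.1) with rfl | h
        · exfalso
          have : (u.2.1 == u.2.1) = true := beq_self_eq_true _
          rw [this] at hv1'
          exact Bool.noConfusion hv1'.2
        · exact h

-- leftover clusters: the dict fold and the list fold agree
theorem pvLeftover_eq (O : List (Int × List Int)) :
    ∀ (d : PySem.Dict Int Int) (lst : List (Int × Int)) (n : Int), d.items = lst →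
      (O.foldl (fun st oc => if st.1.contains oc.1 then st else (st.1.insert oc.1 st.2, st.2 + 1)) (d, n)).1.items
      = (O.foldl (fun st oc => if st.1.any (fun p => p.1 == oc.1) then st else (st.1 ++ [(oc.1, st.2)], st.2 + 1)) (lst, n)).1 := by
  intro d lst n h
  induction O generalizing d lst n with
  | nil => simpa using h
  | cons oc O ih =>
    simp only [List.foldl_cons]
    have hc : d.contains oc.1 = lst.any (fun p => p.1 == oc.1) := by
      rw [PySem.Dict.contains, h]
    by_cases hb : lst.any (fun p => p.1 == oc.1) = true
    · rw [hc, hb]; simp only [if_pos]; exact ih d lst n h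
    · rw [hc, eq_false_of_ne_true hb]; simp only [Bool.false_eq_true, if_neg, not_false_iff]
      exact ih _ _ _ (by rw [PySem.Dict.items_insert_of_not_contains _ _ (by rw [hc]; exact eq_false_of_ne_true hb), h])

-- the built best_matches dict is the structured matrix over enumerated clusters
theorem pvBuildBM_eq (S O : List (Int × List Int))
    (hS : (S.map Prod.fst).Nodup) (hO : (O.map Prod.fst).Nodup) :
    pvBuildBM S O = pvBMOf (PySem.List.enumerate S) (PySem.List.enumerate O) := by
  apply PySem.Dict.ext
  have hout := PySem.Dict.items_foldl_insert_fresh S (fun sc => sc.1)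
    (fun sc => (O.foldl (fun inner oc => inner.insert oc.1 (pvCountA sc.2 oc.2)) PySem.Dict.empty))
    PySem.Dict.empty (fun a _ => rfl) hS
  have hbm : (pvBuildBM S O).items =
      S.map (fun sc => (sc.1, O.foldl (fun inner oc => inner.insert oc.1 (pvCountA sc.2 oc.2)) PySem.Dict.empty)) := by
    simpa [pvBuildBM] using hout
  rw [hbm]
  show _ = (PySem.List.enumerate S).map
      (fun s => (s.2.1, PySem.Dict.mk ((PySem.List.enumerate O).map (fun o => (o.2.1, pvCountA s.2.2 o.2.2)))))
  rw [pvEnum_map_snd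
    (fun sc => (sc.1, PySem.Dict.mk ((PySem.List.enumerate O).map (fun o => (o.2.1, pvCountA sc.2 o.2.2))))) S 0]
  apply List.map_congr_left
  intro sc _
  refine congrArg (fun d => (sc.1, d)) ?_
  apply PySem.Dict.ext
  have hin := PySem.Dict.items_foldl_insert_fresh O (fun oc => oc.1)
    (fun oc => pvCountA sc.2 oc.2) PySem.Dict.empty (fun a _ => rfl) hO
  rw [show (PySem.Dict.mk ((PySem.List.enumerate O).map (fun o => (o.2.1, pvCountA sc.2 o.2.2)))).items
      = (PySem.List.enumerate O).map (fun o => (o.2.1, pvCountA sc.2 o.2.2)) from rfl]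
  rw [pvEnum_map_snd (fun oc => (oc.1, pvCountA sc.2 oc.2)) O 0]
  simpa using hin

-- sorted-stability: sorting by count keeps the (i, j)-lexicographic base order inside equal counts
theorem pvInsertBy_cons {α : Type} (b : α → α → Bool) (x y : α) (ys : List α) :
    PySem.List.insertBy b x (y :: ys) = if b x y then x :: y :: ys else y :: PySem.List.insertBy b x ys := rfl

theorem pvInsertBy_pairwise {α : Type} (key : α → Int) (Q : α → α → Prop) :
    ∀ (acc : List α) (x : α),
      acc.Pairwise (fun a b => key a < key b ∨ (key a = key b ∧ Q a b)) →
      (∀ y ∈ acc, Q y x) →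
      (PySem.List.insertBy (fun a b => decide (key a < key b)) x acc).Pairwise
        (fun a b => key a < key b ∨ (key a = key b ∧ Q a b)) := by
  intro acc
  induction acc with
  | nil => intro x _ _; simp [PySem.List.insertBy]
  | cons y ys ih =>
    intro x hp hq
    have hy : ∀ z ∈ ys, key y < key z ∨ (key y = key z ∧ Q y z) :=
      fun z hz => List.rel_of_pairwise_cons hp hz
    have hys := List.Pairwise.of_cons hp
    rw [pvInsertBy_cons]
    by_cases h : key x < key y
    · rw [if_pos (by simpa using h)]
      refine List.Pairwise.cons (fun z hz => ?_) hp
      rcases List.mem_cons.mp hz with rfl | hz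
      · exact Or.inl h
      · rcases hy z hz with h' | ⟨h', _⟩
        · exact Or.inl (by omega)
        · exact Or.inl (by omega)
    · rw [if_neg (by simpa using h)]
      refine List.Pairwise.cons (fun z hz => ?_) (ih x hys (fun z hz => hq z (List.mem_cons_of_mem _ hz)))
      rcases (PySem.List.mem_insertBy _ _ _ _).mp hz with rfl | hz
      · rcases lt_or_eq_of_le (not_lt.mp h) with h' | h'
        · exact Or.inl h'
        · exact Or.inr ⟨h', hq y (List.mem_cons_self)⟩
      · exact hy z hz

-- sorted-stability: sorting by count keeps the (i, j)-lexicographic base order inside equal counts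
theorem pvSorted_pairwise_stable {α : Type} (key : α → Int) (Q : α → α → Prop)
    {xs : List α} (h : xs.Pairwise Q) :
    (PySem.List.sorted xs key).Pairwise (fun a b => key a < key b ∨ (key a = key b ∧ Q a b)) := by
  rw [PySem.List.sorted_eq_foldl_insertBy]
  suffices H : ∀ (l : List α) (acc : List α),
      l.Pairwise Q →
      acc.Pairwise (fun a b => key a < key b ∨ (key a = key b ∧ Q a b)) →
      (∀ y ∈ acc, ∀ x ∈ l, Q y x) →
      (l.foldl (fun acc x => PySem.List.insertBy (fun a b => decide (key a < key b)) x acc) acc).Pairwise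
        (fun a b => key a < key b ∨ (key a = key b ∧ Q a b)) by
    exact H xs [] h (by simp) (by simp)
  intro l
  induction l with
  | nil => intro acc _ hacc _; simpa using hacc
  | cons x l ih =>
    intro acc hl hacc hql
    simp only [List.foldl_cons]
    refine ih _ (List.Pairwise.of_cons hl) ?_ ?_
    · exact pvInsertBy_pairwise key Q acc x hacc (fun y hy => hql y hy x List.mem_cons_self)
    · intro y hy z hz
      rcases (PySem.List.mem_insertBy _ _ _ _).mp hy with rfl | hy
      · exact List.rel_of_pairwise_cons hl hz
      · exact hql y hy z (List.mem_cons_of_mem _ hz)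


theorem pvSrem_empty (S : List (Int × List Int)) :
    pvSrem S PySem.Set.empty = PySem.List.enumerate S := by
  rw [pvSrem]
  exact List.filter_eq_self.mpr (fun a _ => rfl)

-- ===== VERDICT (by name: the statement is the Claim_ definition above) =====
theorem find_best_cluster_mapping_py_spec : Claim_equal_find_best_cluster_mapping_py := by
  intro S O _ hpre
  obtain ⟨hndS, hndO, hor⟩ := hpre
  unfold Spec_find_best_cluster_mapping_py
  by_cases hemp : (S.isEmpty || O.isEmpty) = true
  · rw [find_best_cluster_mapping_py, find_best_cluster_mapping_py_alt, if_pos hemp, if_pos hemp]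
  · have hempf : (S.isEmpty || O.isEmpty) = false := Bool.eq_false_iff.mpr hemp
    obtain ⟨he1, he2⟩ := Bool.or_eq_false_iff.mp hempf
    have hSne : S ≠ [] := by simpa using he1
    have hOne : O ≠ [] := by simpa using he2
    have hlen : S.length ≤ O.length := by
      rcases hor with h | h | h
      · exact absurd h hSne
      · exact absurd h hOne
      · exact h
    -- common greedy emission list
    set G := pvGreedy (PySem.List.enumerate S).length (PySem.List.enumerate S) (PySem.List.enumerate O) with hG
    -- A side
    have hndS' : ((PySem.List.enumerate S).map (fun s => s.2.1)).Nodup := by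
      rw [pvEnum_map_snd (fun sc => sc.1) S 0]; exact hndS
    have hndO' : ((PySem.List.enumerate O).map (fun o => o.2.1)).Nodup := by
      rw [pvEnum_map_snd (fun oc => oc.1) O 0]; exact hndO
    have hloop := pvLoopA_eq (PySem.List.enumerate S).length (PySem.List.enumerate S)
      (PySem.List.enumerate O) PySem.Dict.empty rfl hndS' hndO'
      (by rw [pvEnum_length, pvEnum_length]; exact hlen)
      (fun _ _ => rfl)
    have hsize : (pvBMOf (PySem.List.enumerate S) (PySem.List.enumerate O)).size
        = (PySem.List.enumerate S).length := by
      show (_ : List _).length = _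
      exact List.length_map ..
    have hA : find_best_cluster_mapping_py S O
        = some ((O.foldl
            (fun st oc => if st.1.contains oc.1 then st else (st.1.insert oc.1 st.2, st.2 + 1))
            (PySem.Dict.mk G, PySem.List.len S)).1.items) := by
      rw [find_best_cluster_mapping_py, if_neg (by rw [hempf]; exact Bool.false_ne_true)]
      rw [pvBuildBM_eq S O hndS hndO, hsize, hloop]
      rfl
    -- B side
    have hQ : (pvAllT S O).Pairwise
        (fun a b => a.2.1 < b.2.1 ∨ (a.2.1 = b.2.1 ∧ a.2.2 < b.2.2)) := by
      rw [pvAllT_eq, List.pairwise_map]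
      exact pvFlat_pairwise (pvEnum_pairwise S 0) (pvEnum_pairwise O 0)
    have hPW : (PySem.List.sorted (pvAllT S O) (fun t => t.1)).Pairwise pvLt :=
      pvSorted_pairwise_stable (fun t : Int × Int × Int => t.1)
        (fun a b : Int × Int × Int => a.2.1 < b.2.1 ∨ (a.2.1 = b.2.1 ∧ a.2.2 < b.2.2)) hQ
    have hperm := PySem.List.sorted_perm (pvAllT S O) (fun t => t.1) false
    have hscan := pvScan_eq S O (PySem.List.sorted (pvAllT S O) (fun t => t.1))
      PySem.Set.empty PySem.Set.empty [] hPW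
      (fun t ht => hperm.subset ht)
      (fun t ht _ _ => hperm.symm.subset ht)
    rw [pvSrem_empty, pvSrem_empty, List.nil_append, ← hG] at hscan
    have hB : find_best_cluster_mapping_py_alt S O
        = some ((O.foldl
            (fun st oc => if st.1.any (fun p => p.1 == oc.1) then st else (st.1 ++ [(oc.1, st.2)], st.2 + 1))
            (G, PySem.List.len S)).1) := by
      rw [find_best_cluster_mapping_py_alt, if_neg (by rw [hempf]; exact Bool.false_ne_true)]
      show some _ = _
      unfold pvAllT at hscan
      rw [hscan]
    rw [hA, hB]
    exact congrArg some (pvLeftover_eq O (PySem.Dict.mk G) G (PySem.List.len S) rfl)
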